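-- pv_equiv track=rewrite | github.com/Akua-Serwaa-Nkrumah/CompetitiveProgramming-master | CompetitiveProgramming-master/Camp/DailyProblems.py/LeftRightDif.py | leftRightDifference
-- ===== SOURCE A (Python) =====
-- def leftRightDifference(nums):
--     p_sum = [nums[0]]*len(nums)
--     s_sum = [nums[-1]]*len(nums)
--     ans = [0]*len(nums)
--
--     for i in range(1,len(nums)):
--         p_sum[i] = p_sum[i-1] + nums[i]
--
--     for j in range(len(nums)-2,-1,-1):
--         s_sum[j] = s_sum[j+1] + nums[j]
--
--     for k in range(len(nums)):
--         ans[k] = abs(p_sum[k]-s_sum[k])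
--
--     return ans
-- ===== SOURCE B (Python) =====
-- def leftRightDifference(nums):
--     total = sum(nums)
--     left = 0
--     ans = []
--     for x in nums:
--         left += x
--         ans.append(abs(left - (total - left + x)))
--     return ans
-- ===== Notes on version B (the rewrite author's own statement) =====
-- stated objective: simpler
-- what changed: Single pass with one scalar running left-sum and the precomputed total, instead of building separate prefix-sum, suffix-sum and answer arrays in three loops.
import Mathlib
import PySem

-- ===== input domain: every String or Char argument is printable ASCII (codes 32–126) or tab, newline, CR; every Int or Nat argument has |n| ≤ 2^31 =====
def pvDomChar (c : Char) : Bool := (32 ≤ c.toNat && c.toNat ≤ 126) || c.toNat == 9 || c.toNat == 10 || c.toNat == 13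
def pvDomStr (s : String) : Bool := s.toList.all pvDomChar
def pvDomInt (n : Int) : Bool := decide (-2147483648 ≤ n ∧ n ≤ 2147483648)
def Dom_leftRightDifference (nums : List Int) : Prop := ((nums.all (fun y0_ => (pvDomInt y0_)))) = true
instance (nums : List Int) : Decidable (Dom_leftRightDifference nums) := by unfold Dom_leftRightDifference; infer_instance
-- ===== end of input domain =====

-- B replaces A's three array-building loops by a single pass with one running left-sum and the
-- precomputed total; on the empty list A raises IndexError (first-element access) while B returns an empty list.


-- ===== PORT A =====
-- literal transliteration: p_sum/s_sum/ans arrays, three index loops with in-place assignment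
def leftRightDifference (nums : List Int) : List Int :=
  match PySem.List.pyGet? nums 0, PySem.List.pyGet? nums (-1) with
  | some a, some b =>
    let n : Int := nums.length
    let p0 : List Int := List.replicate nums.length a
    let s0 : List Int := List.replicate nums.length b
    let ans0 : List Int := List.replicate nums.length 0
    let p := (PySem.List.pyRange 1 n 1).foldl
      (fun l i => PySem.List.pySetD l i (PySem.List.pyGetD l (i - 1) 0 + PySem.List.pyGetD nums i 0)) p0
    let s := (PySem.List.pyRange (n - 2) (-1) (-1)).foldl
      (fun l j => PySem.List.pySetD l j (PySem.List.pyGetD l (j + 1) 0 + PySem.List.pyGetD nums j 0)) s0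
    (PySem.List.pyRange 0 n 1).foldl
      (fun l k => PySem.List.pySetD l k (|PySem.List.pyGetD p k 0 - PySem.List.pyGetD s k 0|)) ans0
  | _, _ => []  -- unreachable under Pre_ (empty list: Python raises IndexError)

-- ===== PORT B =====
def leftRightDifference_alt (nums : List Int) : List Int :=
  let total := nums.sum
  (nums.foldl
    (fun (st : Int × List Int) x =>
      let left := st.1 + x
      (left, st.2 ++ [|left - (total - left + x)|]))
    (0, [])).2

-- ===== PRECONDITION & SPEC =====
-- Pre_ excludes only the empty list, on which A raises IndexError via its first-element access.
def Pre_leftRightDifference (nums : List Int) : Prop := nums ≠ []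
instance (nums : List Int) : Decidable (Pre_leftRightDifference nums) := by unfold Pre_leftRightDifference; infer_instance
def pvWitness_leftRightDifference : List Int := [3, -1, 4]

def Spec_leftRightDifference (nums : List Int) (out : List Int) : Prop := out = leftRightDifference_alt nums
instance (nums : List Int) (out : List Int) : Decidable (Spec_leftRightDifference nums out) := by unfold Spec_leftRightDifference; infer_instance

-- ===== CLAIM (what is proved, stated in full; the proofs are below) =====
def Claim_equal_leftRightDifference : Prop := ∀ (nums : List Int), Dom_leftRightDifference nums → Pre_leftRightDifference nums → Spec_leftRightDifference nums (leftRightDifference nums)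
-- ===== LEMMAS AND PROOFS =====

-- prefix sums (inclusive): pfx nums k = sum of the first k+1 elements
def pvPfx (nums : List Int) (k : Nat) : Int := (nums.take (k + 1)).sum
-- suffix sums (inclusive): sfx nums k = nums[k] + … + nums[n-1]
def pvSfx (nums : List Int) (k : Nat) : Int := (nums.drop k).sum

-- A's first loop builds the prefix-sum array
theorem pvPrefixLoop (nums : List Int) (a : Int) (ha : nums.getD 0 0 = a) (m : Nat)
    (h1 : 1 ≤ m) (hm : m ≤ nums.length) :
    (PySem.List.pyRange 1 (m : Int) 1).foldl
      (fun l i => PySem.List.pySetD l i (PySem.List.pyGetD l (i - 1) 0 + PySem.List.pyGetD nums i 0))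
      (List.replicate nums.length a)
    = (List.range m).map (pvPfx nums) ++ List.replicate (nums.length - m) a := by
  induction m, h1 using Nat.le_induction with
  | base =>
    rcases nums with _ | ⟨y, t⟩
    · exact absurd hm (by simp)
    · simp only [List.getD] at ha
      simp [PySem.List.pyRange_one_eq_nil, pvPfx, List.replicate_succ, ← ha]
  | succ m hm1 ih =>
    have hm' : m ≤ nums.length := by omega
    have hmlt : m < nums.length := by omega
    have hcast : ((m + 1 : Nat) : Int) = (m : Int) + 1 := by omega
    rw [hcast, PySem.List.pyRange_one_succ_right (by exact_mod_cast hm1), List.foldl_append,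
      ih hm']
    simp only [List.foldl_cons, List.foldl_nil]
    have hc1 : (m : Int) - 1 = ((m - 1 : Nat) : Int) := by omega
    rw [hc1, PySem.List.pyGetD_natCast, PySem.List.pyGetD_natCast, PySem.List.pySetD_natCast]
    have hget : ((List.range m).map (pvPfx nums) ++ List.replicate (nums.length - m) a).getD
        (m - 1) 0 = pvPfx nums (m - 1) := by
      rw [List.getD_append _ _ _ (m - 1) (by simp; omega),
        PySem.List.getD_map_range _ _ _ _ (by omega)]
    rw [hget]
    have hval : pvPfx nums (m - 1) + nums.getD m 0 = pvPfx nums m := by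
      have h1 : (m - 1) + 1 = m := by omega
      rw [pvPfx, pvPfx, h1, List.getD_eq_getElem _ _ hmlt, List.sum_take_succ nums m hmlt]
    rw [hval, List.set_append, if_neg (by simp)]
    simp only [List.length_map, List.length_range, Nat.sub_self]
    obtain ⟨k, hk⟩ : ∃ k, nums.length - m = k + 1 := ⟨nums.length - m - 1, by omega⟩
    rw [hk, List.replicate_succ, List.set_cons_zero, List.range_succ, List.map_append]
    have hk2 : k = nums.length - (m + 1) := by omega
    rw [hk2]
    simp

-- A's second loop builds the suffix-sum array (n ≥ 2; j counts down from n-2)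
theorem pvSuffixLoop (nums : List Int) (b : Int) (j : Nat)
    (hj : j + 2 ≤ nums.length) :
    (PySem.List.pyRange (j : Int) (-1) (-1)).foldl
      (fun l j => PySem.List.pySetD l j (PySem.List.pyGetD l (j + 1) 0 + PySem.List.pyGetD nums j 0))
      (List.replicate (j + 1) b ++ (List.range (nums.length - 1 - j)).map (fun t => pvSfx nums (j + 1 + t)))
    = (List.range nums.length).map (pvSfx nums) := by
  induction j with
  | zero =>
    have h0 : 0 < nums.length := by omega
    have hsfx : pvSfx nums 0 = nums.getD 0 0 + pvSfx nums 1 := by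
      rw [pvSfx, pvSfx, List.drop_eq_getElem_cons h0, List.getD_eq_getElem _ _ h0]
      simp
    rw [show ((0 : Nat) : Int) = 0 by norm_num,
      show PySem.List.pyRange (0 : Int) (-1) (-1) = [0] by decide]
    simp only [List.foldl_cons, List.foldl_nil]
    rw [show ((0 : Int) + 1) = ((1 : Nat) : Int) by norm_num, PySem.List.pyGetD_natCast,
      show (0 : Int) = ((0 : Nat) : Int) by norm_num, PySem.List.pyGetD_natCast,
      PySem.List.pySetD_natCast]
    rw [List.getD_append_right _ _ _ _ (by simp),
      show (1 - (List.replicate (0 + 1) b).length) = 0 by simp,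
      PySem.List.getD_map_range _ _ _ _ (by omega)]
    obtain ⟨K, hK⟩ : ∃ K, nums.length = K + 1 := ⟨nums.length - 1, by omega⟩
    rw [hK]
    simp only [List.replicate_succ, List.replicate_zero, List.singleton_append,
      List.set_cons_zero, List.range_succ_eq_map, List.map_cons, List.map_map]
    congr 1
    · rw [show (0 : Nat) + 1 + 0 = 1 from rfl, hsfx]; exact add_comm _ _
    · rw [show K + 1 - 1 - 0 = K by omega]
      apply List.map_congr_left
      intro t ht
      simp only [Function.comp_apply, Nat.succ_eq_add_one]
      congr 1
      omega
  | succ j ih =>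
    have hj' : j + 2 ≤ nums.length := by omega
    have hjlt : j + 1 < nums.length := by omega
    rw [show ((j + 1 : Nat) : Int) = (j : Int) + 1 by omega,
      PySem.List.pyRange_neg_one_cons (by omega : (-1 : Int) < (j : Int) + 1)]
    simp only [List.foldl_cons]
    rw [show (j : Int) + 1 - 1 = ((j : Nat) : Int) by omega]
    have hstep : PySem.List.pySetD
        (List.replicate (j + 1 + 1) b ++
          (List.range (nums.length - 1 - (j + 1))).map (fun t => pvSfx nums (j + 1 + 1 + t)))
        ((j : Int) + 1)
        (PySem.List.pyGetD
          (List.replicate (j + 1 + 1) b ++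
            (List.range (nums.length - 1 - (j + 1))).map (fun t => pvSfx nums (j + 1 + 1 + t)))
          ((j : Int) + 1 + 1) 0 + PySem.List.pyGetD nums ((j : Int) + 1) 0)
        = List.replicate (j + 1) b ++
          (List.range (nums.length - 1 - j)).map (fun t => pvSfx nums (j + 1 + t)) := by
      rw [show (j : Int) + 1 + 1 = ((j + 2 : Nat) : Int) by omega,
        PySem.List.pyGetD_natCast,
        show (j : Int) + 1 = ((j + 1 : Nat) : Int) by omega,
        PySem.List.pyGetD_natCast, PySem.List.pySetD_natCast]
      rw [List.getD_append_right _ _ _ _ (by simp),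
        show (j + 2 - (List.replicate (j + 1 + 1) b).length) = 0 by simp,
        PySem.List.getD_map_range _ _ _ _ (by omega)]
      have hsfx : pvSfx nums (j + 1) = nums.getD (j + 1) 0 + pvSfx nums (j + 2) := by
        rw [pvSfx, pvSfx, List.getD_eq_getElem _ _ hjlt, List.drop_eq_getElem_cons hjlt,
          List.sum_cons]
      rw [List.set_append, if_pos (by simp), List.replicate_succ' (n := j + 1),
        List.set_append, if_neg (by simp), List.length_replicate, Nat.sub_self,
        List.set_cons_zero]
      obtain ⟨K, hK⟩ : ∃ K, nums.length - 1 - j = K + 1 := ⟨nums.length - 2 - j, by omega⟩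
      rw [hK, List.range_succ_eq_map, List.map_cons, List.map_map]
      rw [List.append_assoc, List.singleton_append]
      congr 1
      congr 1
      · rw [show j + 1 + 0 = j + 1 from rfl, hsfx]; exact add_comm _ _
      · rw [show nums.length - 1 - (j + 1) = K by omega]
        apply List.map_congr_left
        intro t ht
        simp only [Function.comp_apply, Nat.succ_eq_add_one]
        congr 1
        omega
    rw [hstep]
    exact ih hj'

-- A's third loop fills the answer array
theorem pvAnsLoop (nums p s : List Int) (m : Nat) (hm : m ≤ nums.length) :
    (PySem.List.pyRange 0 (m : Int) 1).foldl
      (fun l k => PySem.List.pySetD l k (|PySem.List.pyGetD p k 0 - PySem.List.pyGetD s k 0|))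
      (List.replicate nums.length 0)
    = (List.range m).map (fun k => |p.getD k 0 - s.getD k 0|) ++ List.replicate (nums.length - m) 0 := by
  induction m with
  | zero => simp [PySem.List.pyRange_one_eq_nil]
  | succ m ih =>
    have hm' : m ≤ nums.length := by omega
    have hcast : ((m + 1 : Nat) : Int) = (m : Int) + 1 := by omega
    rw [hcast, PySem.List.pyRange_one_succ_right (by exact_mod_cast Nat.zero_le m),
      List.foldl_append, ih hm']
    simp only [List.foldl_cons, List.foldl_nil]
    rw [PySem.List.pyGetD_natCast, PySem.List.pyGetD_natCast, PySem.List.pySetD_natCast,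
      List.set_append, if_neg (by simp)]
    simp only [List.length_map, List.length_range, Nat.sub_self]
    obtain ⟨k, hk⟩ : ∃ k, nums.length - m = k + 1 := ⟨nums.length - m - 1, by omega⟩
    rw [hk, List.replicate_succ, List.set_cons_zero, List.range_succ, List.map_append]
    have hk2 : k = nums.length - (m + 1) := by omega
    rw [hk2]
    simp

-- closed form of A on a nonempty list
theorem pvA_closed (nums : List Int) (h : nums ≠ []) :
    leftRightDifference nums
    = (List.range nums.length).map (fun k => |pvPfx nums k - pvSfx nums k|) := by
  obtain ⟨y, t, rfl⟩ : ∃ y t, nums = y :: t := by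
    cases nums with
    | nil => exact absurd rfl h
    | cons y t => exact ⟨y, t, rfl⟩
  have h0 : PySem.List.pyGet? (y :: t) 0 = some y := by simp [pysem]
  have hlast : PySem.List.pyGet? (y :: t) (-1)
      = some ((y :: t).getLast (List.cons_ne_nil y t)) := by
    rw [PySem.List.pyGet?_neg_one, List.getLast?_eq_some_getLast]
  unfold leftRightDifference
  rw [h0, hlast]
  dsimp only
  have hp := pvPrefixLoop (y :: t) y rfl (y :: t).length (by simp) (le_refl _)
  rw [hp, Nat.sub_self, List.replicate_zero, List.append_nil]
  have hs : (PySem.List.pyRange ((((y :: t).length : Nat) : Int) - 2) (-1) (-1)).foldl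
      (fun l j => PySem.List.pySetD l j
        (PySem.List.pyGetD l (j + 1) 0 + PySem.List.pyGetD (y :: t) j 0))
      (List.replicate (y :: t).length ((y :: t).getLast (List.cons_ne_nil y t)))
      = (List.range (y :: t).length).map (pvSfx (y :: t)) := by
    rcases t with _ | ⟨z, u⟩
    · rw [PySem.List.pyRange_neg_one_eq_nil (by norm_num)]
      simp [pvSfx]
    · set L := (y :: z :: u).length with hLdef
      have hL : L = u.length + 2 := by simp [hLdef]
      have hlastval : pvSfx (y :: z :: u) (L - 1)
          = (y :: z :: u).getLast (List.cons_ne_nil y (z :: u)) := by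
        rw [pvSfx, List.getLast_eq_getElem,
          List.drop_eq_getElem_cons (by omega : L - 1 < (y :: z :: u).length),
          show L - 1 + 1 = (y :: z :: u).length by omega, List.drop_length, List.sum_cons,
          List.sum_nil, add_zero]
      have hinit : List.replicate L ((y :: z :: u).getLast (List.cons_ne_nil y (z :: u)))
          = List.replicate ((L - 2) + 1) ((y :: z :: u).getLast (List.cons_ne_nil y (z :: u)))
            ++ (List.range ((y :: z :: u).length - 1 - (L - 2))).map
                (fun t => pvSfx (y :: z :: u) ((L - 2) + 1 + t)) := by
        rw [show (y :: z :: u).length - 1 - (L - 2) = 1 by omega, List.range_one,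
          List.map_cons, List.map_nil]
        have h1 : pvSfx (y :: z :: u) ((L - 2) + 1 + 0)
            = (y :: z :: u).getLast (List.cons_ne_nil y (z :: u)) := by
          rw [show (L - 2) + 1 + 0 = L - 1 by omega]
          exact hlastval
        rw [h1, ← List.replicate_succ' (n := (L - 2) + 1),
          show (L - 2) + 1 + 1 = L by omega]
      rw [show ((L : Nat) : Int) - 2 = (((L - 2 : Nat)) : Int) by omega, hinit,
        pvSuffixLoop (y :: z :: u) _ (L - 2) (by omega)]
  rw [hs]
  have ha := pvAnsLoop (y :: t) ((List.range (y :: t).length).map (pvPfx (y :: t)))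
      ((List.range (y :: t).length).map (pvSfx (y :: t))) (y :: t).length (le_refl _)
  rw [ha, Nat.sub_self, List.replicate_zero, List.append_nil]
  apply List.map_congr_left
  intro k hk
  rw [List.mem_range] at hk
  rw [PySem.List.getD_map_range _ _ _ _ hk, PySem.List.getD_map_range _ _ _ _ hk]

-- B's fold, unrolled
def pvBAux (total : Int) : Int → List Int → List Int
  | _, [] => []
  | s, x :: xs => |(s + x) - (total - (s + x) + x)| :: pvBAux total (s + x) xs

theorem pvBFold (total : Int) (xs : List Int) (s : Int) (acc : List Int) :
    (xs.foldl
      (fun (st : Int × List Int) x =>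
        let left := st.1 + x
        (left, st.2 ++ [|left - (total - left + x)|]))
      (s, acc)).2 = acc ++ pvBAux total s xs := by
  induction xs generalizing s acc with
  | nil => simp [pvBAux]
  | cons x xs ih =>
    simp only [List.foldl_cons, pvBAux]
    rw [ih]
    simp [List.append_assoc]

theorem pvBAux_closed (total : Int) (xs : List Int) (s : Int) :
    pvBAux total s xs
    = (List.range xs.length).map
        (fun k => |(s + (xs.take (k + 1)).sum) - (total - s - (xs.take k).sum)|) := by
  induction xs generalizing s with
  | nil => simp [pvBAux]
  | cons x xs ih =>
    rw [pvBAux, ih (s + x), List.length_cons, List.range_succ_eq_map, List.map_cons,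
      List.map_map]
    congr 1
    · simp only [List.take_succ_cons, List.take_zero, List.sum_cons, List.sum_nil, add_zero]
      congr 1
      ring
    · apply List.map_congr_left
      intro k hk
      simp only [Function.comp_apply, Nat.succ_eq_add_one, List.take_succ_cons, List.sum_cons]
      congr 1
      ring

-- closed form of B
theorem pvB_closed (nums : List Int) :
    leftRightDifference_alt nums
    = (List.range nums.length).map
        (fun k => |pvPfx nums k - (nums.sum - (nums.take k).sum)|) := by
  unfold leftRightDifference_alt
  rw [pvBFold nums.sum nums 0 [], List.nil_append, pvBAux_closed]
  apply List.map_congr_left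
  intro k hk
  simp only [pvPfx, zero_add, sub_zero]

-- ===== VERDICT (by name: the statement is the Claim_ definition above) =====
theorem leftRightDifference_spec : Claim_equal_leftRightDifference := by
  intro nums _ hpre
  unfold Spec_leftRightDifference
  rw [pvA_closed nums hpre, pvB_closed nums]
  apply List.map_congr_left
  intro k hk
  rw [List.mem_range] at hk
  have : (nums.take k).sum + pvSfx nums k = nums.sum := nums.sum_take_add_sum_drop k
  have : pvSfx nums k = nums.sum - (nums.take k).sum := by omega
  rw [this]
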